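-- pv_equiv track=rewrite | github.com/browngres/Gizmos | sudoku/judge.py | which_house
-- ===== SOURCE A (Python) =====
-- import itertools
--
-- def which_house(i, j):  # 哪一宫
--     if i < 4:
--         for m in itertools.product([1, 2, 3], repeat=2):
--             if m == (i, j):
--                 return 1
--         for m in itertools.product([1, 2, 3], [4, 5, 6]):
--             if (i, j) == m:
--                 return 2
--         for m in itertools.product([1, 2, 3], [7, 8, 9]):
--             if (i, j) == m:
--                 return 3
--     if i > 6:
--         for m in itertools.product([7, 8, 9], [1, 2, 3]):
--             if (i, j) == m:
--                 return 7
--         for m in itertools.product([7, 8, 9], [4, 5, 6]):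
--             if (i, j) == m:
--                 return 8
--         for m in itertools.product([7, 8, 9], repeat=2):
--             if (i, j) == m:
--                 return 9
--     for m in itertools.product([4, 5, 6], [1, 2, 3]):
--         if (i, j) == m:
--             return 4
--     for m in itertools.product([4, 5, 6], repeat=2):
--         if (i, j) == m:
--             return 5
--     for m in itertools.product([4, 5, 6], [7, 8, 9]):
--         if (i, j) == m:
--             return 6
-- ===== SOURCE B (Python) =====
-- def which_house(i, j):
--     if 1 <= i <= 9 and 1 <= j <= 9:
--         return (i - 1) // 3 * 3 + (j - 1) // 3 + 1
--     return None
-- ===== Notes on version B (the rewrite author's own statement) =====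
-- stated objective: simpler
-- what changed: Replaces the nine exhaustive itertools.product scans over the 81 cells with the closed-form house formula (i-1)//3*3 + (j-1)//3 + 1 guarded by a 1..9 range check.
import Mathlib
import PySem

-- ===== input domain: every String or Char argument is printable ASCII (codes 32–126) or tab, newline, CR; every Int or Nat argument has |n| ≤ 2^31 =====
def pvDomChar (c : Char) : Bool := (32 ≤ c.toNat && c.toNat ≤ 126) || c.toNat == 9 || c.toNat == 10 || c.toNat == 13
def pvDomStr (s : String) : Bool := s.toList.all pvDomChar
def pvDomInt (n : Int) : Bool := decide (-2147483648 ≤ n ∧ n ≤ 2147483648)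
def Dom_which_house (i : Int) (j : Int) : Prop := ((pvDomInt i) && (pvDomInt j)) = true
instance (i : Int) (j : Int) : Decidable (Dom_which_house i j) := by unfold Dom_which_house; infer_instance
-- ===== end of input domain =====

-- B replaces A's nine exhaustive product-scans over all 81 cells with the closed-form house formula (simpler).


-- ===== PORT A =====
-- itertools.product(xs, ys): all pairs in order
def pvProduct (xs ys : List Int) : List (Int × Int) :=
  xs.flatMap (fun a => ys.map (fun b => (a, b)))

-- 'for m in product(xs, ys): if m == (i, j): return …' — does the scan find a match?
def pvHit (xs ys : List Int) (i j : Int) : Bool :=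
  (pvProduct xs ys).any (fun m => m == (i, j))

-- the last three scans (always reached when nothing returned earlier)
def pvTail2 (i j : Int) : Option Int :=
  if pvHit [4,5,6] [1,2,3] i j then some 4
  else if pvHit [4,5,6] [4,5,6] i j then some 5
  else if pvHit [4,5,6] [7,8,9] i j then some 6
  else none

-- the 'if i > 6' block, falling through to the last three scans
def pvTail1 (i j : Int) : Option Int :=
  if i > 6 then
    if pvHit [7,8,9] [1,2,3] i j then some 7
    else if pvHit [7,8,9] [4,5,6] i j then some 8
    else if pvHit [7,8,9] [7,8,9] i j then some 9
    else pvTail2 i j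
  else pvTail2 i j

def which_house (i : Int) (j : Int) : Option Int :=
  if i < 4 then
    if pvHit [1,2,3] [1,2,3] i j then some 1
    else if pvHit [1,2,3] [4,5,6] i j then some 2
    else if pvHit [1,2,3] [7,8,9] i j then some 3
    else pvTail1 i j
  else pvTail1 i j

-- ===== PORT B =====
def which_house_alt (i : Int) (j : Int) : Option Int :=
  if 1 ≤ i ∧ i ≤ 9 ∧ 1 ≤ j ∧ j ≤ 9 then
    some (PySem.Int.floordiv (i - 1) 3 * 3 + PySem.Int.floordiv (j - 1) 3 + 1)
  else none

-- ===== PRECONDITION & SPEC =====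
def Spec_which_house (i : Int) (j : Int) (out : Option Int) : Prop := out = which_house_alt i j
instance (i : Int) (j : Int) (out : Option Int) : Decidable (Spec_which_house i j out) := by unfold Spec_which_house; infer_instance

-- ===== CLAIM (what is proved, stated in full; the proofs are below) =====
def Claim_equal_which_house : Prop := ∀ (i : Int) (j : Int), Dom_which_house i j → Spec_which_house i j (which_house i j)

-- ===== LEMMAS AND PROOFS =====
theorem pvHit_iff (xs ys : List Int) (i j : Int) :
    pvHit xs ys i j = true ↔ i ∈ xs ∧ j ∈ ys := by
  constructor
  · intro h
    rcases List.any_eq_true.mp h with ⟨m, hm, hb⟩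
    rcases List.mem_flatMap.mp hm with ⟨a, ha, hm2⟩
    rcases List.mem_map.mp hm2 with ⟨b, hb2, rfl⟩
    have he : (a, b) = (i, j) := by simpa using hb
    rw [Prod.mk.injEq] at he
    obtain ⟨rfl, rfl⟩ := he
    exact ⟨ha, hb2⟩
  · rintro ⟨hi, hj⟩
    exact List.any_eq_true.mpr ⟨(i, j),
      List.mem_flatMap.mpr ⟨i, hi, List.mem_map.mpr ⟨j, hj, rfl⟩⟩, by simp⟩

set_option maxHeartbeats 2000000 in
theorem which_house_in (i j : Int) (hi : 1 ≤ i ∧ i ≤ 9) (hj : 1 ≤ j ∧ j ≤ 9) :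
    which_house i j = which_house_alt i j := by
  obtain ⟨hi1, hi2⟩ := hi
  obtain ⟨hj1, hj2⟩ := hj
  interval_cases i <;> interval_cases j <;> rfl

set_option maxHeartbeats 4000000 in
theorem which_house_out (i j : Int) (h : ¬ (1 ≤ i ∧ i ≤ 9 ∧ 1 ≤ j ∧ j ≤ 9)) :
    which_house i j = which_house_alt i j := by
  have halt : which_house_alt i j = none := by simp only [which_house_alt, if_neg h]
  rw [halt]
  simp only [which_house, pvTail1, pvTail2]
  split_ifs <;> first
    | rfl
    | (simp only [pvHit_iff, List.mem_cons, List.not_mem_nil, or_false] at *; omega)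

-- ===== VERDICT (by name: the statement is the Claim_ definition above) =====
theorem which_house_spec : Claim_equal_which_house := by
  intro i j _
  unfold Spec_which_house
  by_cases h : 1 ≤ i ∧ i ≤ 9 ∧ 1 ≤ j ∧ j ≤ 9
  · exact which_house_in i j ⟨h.1, h.2.1⟩ ⟨h.2.2.1, h.2.2.2⟩
  · exact which_house_out i j h
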